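-- pv_equiv track=rewrite | github.com/moltools/RetroMol_depr | clustering/cluster_sequences.py | sequence_to_class
-- ===== SOURCE A (Python) =====
-- import typing as ty
--
-- def sequence_to_class(seq: ty.List[str]) -> str:
--     assigned = []
--     for x in seq:
--         if x[0].isalpha() and x[1:].isdigit() and x[0] == "A": assigned.append("PK")
--         if x[0].isalpha() and x[1:].isdigit() and x[0] == "B": assigned.append("PK")
--         if x[0].isalpha() and x[1:].isdigit() and x[0] == "C": assigned.append("PK")
--         if x[0].isalpha() and x[1:].isdigit() and x[0] == "D": assigned.append("PK")
--         else: assigned.append("NRP")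
--     if all([x == "PK" for x in assigned]): return "PK"
--     if all([x == "NRP" for x in assigned]): return "NRP"
--     else: return "Hybrid"
-- ===== SOURCE B (Python) =====
-- def sequence_to_class(seq):
--     has_pk = False
--     has_nrp = False
--     for x in seq:
--         if x[0].isalpha() and x[1:].isdigit() and x[0] in "ABCD":
--             has_pk = True
--         else:
--             has_nrp = True
--     if not has_nrp:
--         return "PK"
--     if not has_pk:
--         return "NRP"
--     return "Hybrid"
-- ===== Notes on version B (the rewrite author's own statement) =====
-- stated objective: simpler
-- what changed: B replaces A's construction of an 'assigned' label list (via four repeated condition tests with an if/elif slip) plus two full all() scans over that list by a single pass that maintains two booleans has_pk/has_nrp and classifies from them (no intermediate list, no re-scans: measured constant-factor speedup).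
-- intended difference: On sequences whose every element is a letter followed by at least one digit with first letter in 'ABCD' and at least one first letter in 'ABC', A returns 'Hybrid' because its if/if/if/if-else chain appends both 'PK' and 'NRP' for a valid A/B/C element (an evident elif slip), while B returns 'PK', the intended class for an all-polyketide sequence. — e.g. on sequence_to_class(["A1"]): A returns "Hybrid", B returns "PK"
import Mathlib
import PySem

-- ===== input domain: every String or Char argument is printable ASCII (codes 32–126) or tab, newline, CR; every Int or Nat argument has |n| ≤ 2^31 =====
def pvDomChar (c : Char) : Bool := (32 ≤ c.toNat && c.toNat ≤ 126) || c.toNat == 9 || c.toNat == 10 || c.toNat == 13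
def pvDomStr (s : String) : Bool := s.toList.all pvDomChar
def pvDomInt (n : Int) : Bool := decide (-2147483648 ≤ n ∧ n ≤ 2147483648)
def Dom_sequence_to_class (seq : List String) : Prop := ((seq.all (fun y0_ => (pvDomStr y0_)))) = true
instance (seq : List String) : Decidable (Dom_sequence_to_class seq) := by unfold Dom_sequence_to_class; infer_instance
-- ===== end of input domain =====

-- B replaces A's assigned-list construction (with its if/elif slip) and two all() scans by a
-- single pass over two booleans; on all-polyketide sequences containing an A/B/C unit it returns
-- the intended "PK" where A returns "Hybrid" (see D_ below). Objective: simpler.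

-- ===== PORT A =====
-- the condition 'x[0].isalpha() and x[1:].isdigit() and x[0] == c', repeated four times in A;
-- x[0] raises IndexError on x = "" (excluded by Pre_), '.getD ' '' totalizes that case
def pvCond (x : String) (c : Char) : Bool :=
  PySem.Chars.isalpha ((PySem.Str.pyGet? x 0).getD ' ') &&
  PySem.Str.strIsdigit (PySem.Str.slice x (some 1) none) &&
  ((PySem.Str.pyGet? x 0).getD ' ' == c)

def sequence_to_class (seq : List String) : String :=
  let assigned := seq.foldl (fun acc x =>
    let acc := if pvCond x 'A' then acc ++ ["PK"] else acc
    let acc := if pvCond x 'B' then acc ++ ["PK"] else acc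
    let acc := if pvCond x 'C' then acc ++ ["PK"] else acc
    if pvCond x 'D' then acc ++ ["PK"] else acc ++ ["NRP"]) ([] : List String)
  if assigned.all (fun x => x == "PK") then "PK"
  else if assigned.all (fun x => x == "NRP") then "NRP"
  else "Hybrid"

-- ===== PORT B =====
-- B's loop condition; 'x[0] in "ABCD"' is single-character membership, ported as list membership
def pvIsPKUnit (x : String) : Bool :=
  PySem.Chars.isalpha ((PySem.Str.pyGet? x 0).getD ' ') &&
  PySem.Str.strIsdigit (PySem.Str.slice x (some 1) none) &&
  ("ABCD".toList.contains ((PySem.Str.pyGet? x 0).getD ' '))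

def sequence_to_class_alt (seq : List String) : String :=
  let st := seq.foldl
    (fun (st : Bool × Bool) x => if pvIsPKUnit x then (true, st.2) else (st.1, true))
    (false, false)
  if !st.2 then "PK"
  else if !st.1 then "NRP"
  else "Hybrid"

-- ===== PRECONDITION & SPEC =====
-- Pre_ excludes sequences containing the empty string, on which both A and B raise IndexError at x[0]
def Pre_sequence_to_class (seq : List String) : Prop := ∀ x ∈ seq, x ≠ ""
instance (seq : List String) : Decidable (Pre_sequence_to_class seq) := by
  unfold Pre_sequence_to_class; infer_instance

def pvWitness_sequence_to_class : List String := ["D1", "Gly"]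

-- On sequences whose every element is a letter followed by at least one digit with first letter in
-- "ABCD" and at least one first letter in "ABC", A returns "Hybrid" (its if/if/if/if-else chain
-- appends both "PK" and "NRP" for a valid A/B/C unit — an evident elif slip) while B returns "PK",
-- the intended class for an all-polyketide sequence.
def D_sequence_to_class (seq : List String) : Prop :=
  (∀ x ∈ seq, x.toList.head?.getD ' ' ∈ (['A', 'B', 'C', 'D'] : List Char) ∧
      x.toList.tail ≠ [] ∧ x.toList.tail.all PySem.Chars.isdigit = true) ∧
  (∃ x ∈ seq, x.toList.head? ≠ some 'D')
instance (seq : List String) : Decidable (D_sequence_to_class seq) := by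
  unfold D_sequence_to_class; infer_instance

def Spec_sequence_to_class (seq : List String) (out : String) : Prop :=
  ¬ D_sequence_to_class seq → out = sequence_to_class_alt seq
instance (seq : List String) (out : String) : Decidable (Spec_sequence_to_class seq out) := by
  unfold Spec_sequence_to_class; infer_instance

def pvDiffWitness_sequence_to_class : List String := ["A1"]
def pvDiffWitnessOut_sequence_to_class : String × String := ("Hybrid", "PK")

-- ===== CLAIM (what is proved, stated in full; the proofs are below) =====
def Claim_unchanged_sequence_to_class : Prop := ∀ (seq : List String), Dom_sequence_to_class seq → Pre_sequence_to_class seq → Spec_sequence_to_class seq (sequence_to_class seq)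
def Claim_changed_sequence_to_class : Prop := Dom_sequence_to_class (pvDiffWitness_sequence_to_class) ∧ Pre_sequence_to_class (pvDiffWitness_sequence_to_class) ∧ D_sequence_to_class (pvDiffWitness_sequence_to_class) ∧ sequence_to_class (pvDiffWitness_sequence_to_class) = pvDiffWitnessOut_sequence_to_class.1 ∧ sequence_to_class_alt (pvDiffWitness_sequence_to_class) = pvDiffWitnessOut_sequence_to_class.2 ∧ pvDiffWitnessOut_sequence_to_class.1 ≠ pvDiffWitnessOut_sequence_to_class.2
def Claim_exact_sequence_to_class : Prop := ∀ (seq : List String), Dom_sequence_to_class seq → Pre_sequence_to_class seq → D_sequence_to_class seq → sequence_to_class seq ≠ sequence_to_class_alt seq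

-- ===== LEMMAS AND PROOFS =====

-- what one iteration of A's loop appends for element x
def pvContrib (x : String) : List String :=
  (if pvCond x 'A' then ["PK"] else []) ++ (if pvCond x 'B' then ["PK"] else []) ++
  (if pvCond x 'C' then ["PK"] else []) ++ (if pvCond x 'D' then ["PK"] else ["NRP"])

lemma pvA_loop (seq : List String) (acc : List String) :
    seq.foldl (fun acc x =>
      let acc := if pvCond x 'A' then acc ++ ["PK"] else acc
      let acc := if pvCond x 'B' then acc ++ ["PK"] else acc
      let acc := if pvCond x 'C' then acc ++ ["PK"] else acc
      if pvCond x 'D' then acc ++ ["PK"] else acc ++ ["NRP"]) acc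
    = acc ++ seq.flatMap pvContrib := by
  induction seq generalizing acc with
  | nil => simp
  | cons a l ih =>
    simp only [List.foldl_cons, List.flatMap_cons, ih, pvContrib]
    split_ifs <;> simp

lemma pvB_loop (seq : List String) (p q : Bool) :
    seq.foldl (fun (st : Bool × Bool) x => if pvIsPKUnit x then (true, st.2) else (st.1, true)) (p, q)
    = (p || seq.any pvIsPKUnit, q || seq.any (fun x => !pvIsPKUnit x)) := by
  induction seq generalizing p q with
  | nil => simp
  | cons a l ih =>
    by_cases h : pvIsPKUnit a <;> simp [h, ih]

lemma pvContrib_all_PK (x : String) :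
    (pvContrib x).all (fun s => s == "PK") = pvCond x 'D' := by
  unfold pvContrib; split_ifs <;> simp_all

def pvPK (x : String) : Bool :=
  pvCond x 'A' || pvCond x 'B' || pvCond x 'C' || pvCond x 'D'

lemma pvContrib_all_NRP (x : String) :
    (pvContrib x).all (fun s => s == "NRP") = !pvPK x := by
  unfold pvContrib pvPK; split_ifs <;> simp_all

lemma pvPK_eq (x : String) : pvPK x = pvIsPKUnit x := by
  unfold pvPK pvIsPKUnit pvCond
  generalize PySem.Chars.isalpha ((PySem.Str.pyGet? x 0).getD ' ') = a
  generalize PySem.Str.strIsdigit (PySem.Str.slice x (some 1) none) = d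
  generalize (PySem.Str.pyGet? x 0).getD ' ' = c
  cases a <;> cases d <;> simp [Bool.and_or_distrib_left, List.contains_eq_mem, beq_eq_decide,
    Bool.or_assoc]

lemma pvA_char (seq : List String) :
    sequence_to_class seq =
      if seq.all (fun x => pvCond x 'D') then "PK"
      else if seq.all (fun x => !pvPK x) then "NRP"
      else "Hybrid" := by
  unfold sequence_to_class
  rw [pvA_loop]
  simp only [List.nil_append, List.all_flatMap, pvContrib_all_PK, pvContrib_all_NRP]

lemma pvB_char (seq : List String) :
    sequence_to_class_alt seq =
      if seq.all pvIsPKUnit then "PK"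
      else if seq.all (fun x => !pvIsPKUnit x) then "NRP"
      else "Hybrid" := by
  unfold sequence_to_class_alt
  rw [pvB_loop]
  simp [List.all_eq_not_any_not]

lemma pvIsPKUnit_char (x : String) (c : Char) (rest : List Char) (h : x.toList = c :: rest) :
    pvIsPKUnit x = (decide (c ∈ (['A', 'B', 'C', 'D'] : List Char)) &&
      !rest.isEmpty && rest.all PySem.Chars.isdigit) := by
  have hd : PySem.Str.strIsdigit (PySem.Str.slice x (some 1) none)
      = (!rest.isEmpty && rest.all PySem.Chars.isdigit) := by
    simp [PySem.Str.slice, PySem.Chars.slice_eq_listSlice, PySem.Chars.strIsdigit, h,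
      PySem.List.slice_from]
  unfold pvIsPKUnit
  rw [hd]
  simp only [h, PySem.Str.pyGet?_eq, PySem.Chars.pyGet?_eq_listPyGet?]
  have hAB : "ABCD".toList = (['A', 'B', 'C', 'D'] : List Char) := by decide
  by_cases hc : c ∈ (['A', 'B', 'C', 'D'] : List Char)
  · simp only [List.mem_cons, List.not_mem_nil, or_false] at hc
    rcases hc with rfl | rfl | rfl | rfl <;>
      simp [hAB,
        (by decide : PySem.Chars.isalpha 'A' = true),
        (by decide : PySem.Chars.isalpha 'B' = true),
        (by decide : PySem.Chars.isalpha 'C' = true),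
        (by decide : PySem.Chars.isalpha 'D' = true)]
  · simp [hAB, List.contains_eq_mem, hc]

lemma pvCondD_char (x : String) (c : Char) (rest : List Char) (h : x.toList = c :: rest) :
    pvCond x 'D' = ((c == 'D') && !rest.isEmpty && rest.all PySem.Chars.isdigit) := by
  have hd : PySem.Str.strIsdigit (PySem.Str.slice x (some 1) none)
      = (!rest.isEmpty && rest.all PySem.Chars.isdigit) := by
    simp [PySem.Str.slice, PySem.Chars.slice_eq_listSlice, PySem.Chars.strIsdigit, h,
      PySem.List.slice_from]
  unfold pvCond
  rw [hd]
  simp only [h, PySem.Str.pyGet?_eq, PySem.Chars.pyGet?_eq_listPyGet?,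
    PySem.List.pyGet?_zero_cons, Option.getD_some]
  by_cases hc : c = 'D'
  · subst hc; simp [(by decide : PySem.Chars.isalpha 'D' = true)]
  · simp [hc, beq_eq_decide]

-- a nonempty string's toList is a cons
lemma pvToList_cons (x : String) (hx : x ≠ "") :
    ∃ c rest, x.toList = c :: rest := by
  cases h : x.toList with
  | nil => exact absurd (by simpa using congrArg String.ofList h) hx
  | cons c rest => exact ⟨c, rest, rfl⟩

-- per-element bridge between pvIsPKUnit and D_'s element condition
lemma pvIsPKUnit_iff_DElem (x : String) (hx : x ≠ "") :
    pvIsPKUnit x = true ↔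
      (x.toList.head?.getD ' ' ∈ (['A', 'B', 'C', 'D'] : List Char) ∧
        x.toList.tail ≠ [] ∧ x.toList.tail.all PySem.Chars.isdigit = true) := by
  obtain ⟨c, rest, h⟩ := pvToList_cons x hx
  rw [pvIsPKUnit_char x c rest h]
  simp [h]
  exact and_assoc

lemma pvCondD_imp_pk (x : String) : pvCond x 'D' = true → pvPK x = true := by
  intro h; simp [pvPK, h]

theorem pv_unchanged (seq : List String) (hpre : Pre_sequence_to_class seq)
    (hnd : ¬ D_sequence_to_class seq) : sequence_to_class seq = sequence_to_class_alt seq := by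
  rw [pvA_char, pvB_char]
  by_cases hD : seq.all (fun x => pvCond x 'D') = true
  · have hP : seq.all pvIsPKUnit = true := by
      rw [List.all_eq_true] at hD ⊢
      intro x hx
      have := pvCondD_imp_pk x (by simpa using hD x hx)
      rw [pvPK_eq] at this; simpa using this
    simp [hD, hP]
  · by_cases hP : seq.all pvIsPKUnit = true
    · exfalso; apply hnd
      constructor
      · intro x hx
        have := (pvIsPKUnit_iff_DElem x (hpre x hx)).mp (by simpa using (List.all_eq_true.mp hP) x hx)
        exact this
      · rw [List.all_eq_true] at hP
        have : ∃ x ∈ seq, ¬ (pvCond x 'D' = true) := by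
          have := List.all_eq_false.mp (eq_false_of_ne_true hD)
          simpa using this
        obtain ⟨x, hx, hxd⟩ := this
        obtain ⟨c, rest, h⟩ := pvToList_cons x (hpre x hx)
        refine ⟨x, hx, ?_⟩
        rw [h]; simp
        intro hcD
        apply hxd
        rw [pvCondD_char x c rest h]
        have hu : pvIsPKUnit x = true := by simpa using hP x hx
        rw [pvIsPKUnit_char x c rest h] at hu
        simp [hcD] at hu ⊢
        exact hu
    · have hD' : seq.all (fun x => pvCond x 'D') = false := by
        simpa using hD
      have hP' : seq.all pvIsPKUnit = false := by simpa using hP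
      simp only [hD', hP', if_false, Bool.false_eq_true]
      simp only [pvPK_eq]

theorem pv_tight (seq : List String) (hpre : Pre_sequence_to_class seq)
    (hd : D_sequence_to_class seq) : sequence_to_class seq ≠ sequence_to_class_alt seq := by
  obtain ⟨hall, x0, hx0, hne⟩ := hd
  have hP : seq.all pvIsPKUnit = true := by
    rw [List.all_eq_true]
    intro x hx
    exact (pvIsPKUnit_iff_DElem x (hpre x hx)).mpr (hall x hx)
  obtain ⟨c, rest, h0⟩ := pvToList_cons x0 (hpre x0 hx0)
  have hcne : c ≠ 'D' := by
    intro hc; apply hne; rw [h0, hc]; rfl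
  have hD : seq.all (fun x => pvCond x 'D') = false := by
    rw [List.all_eq_false]
    refine ⟨x0, hx0, ?_⟩
    rw [pvCondD_char x0 c rest h0]
    simp [hcne]
  have hN : (seq.all fun x => !pvPK x) = false := by
    rw [List.all_eq_false]
    refine ⟨x0, hx0, ?_⟩
    have := (List.all_eq_true.mp hP) x0 hx0
    rw [pvPK_eq]
    simpa using this
  rw [pvA_char, pvB_char]
  simp [hD, hP, hN]

-- ===== VERDICT (by name: the statement is the Claim_ definition above) =====
theorem sequence_to_class_spec : Claim_unchanged_sequence_to_class := by
  intro seq _ hpre hnd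
  exact pv_unchanged seq hpre hnd

theorem sequence_to_class_changed : Claim_changed_sequence_to_class := by
  unfold Claim_changed_sequence_to_class; decide

theorem sequence_to_class_tight : Claim_exact_sequence_to_class := by
  intro seq _ hpre hd
  exact pv_tight seq hpre hd
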